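-- pv_equiv track=rewrite | github.com/Ernestnzx/rosalind | textbook/ba6c.py | cycles
-- ===== SOURCE A (Python) =====
-- def chromosome_to_cycle(c):
--     nodes = []
--     for i,s in enumerate(c):
--         if s > 0: nodes.extend([2*s-1,2*s])
--         else: nodes.extend([-2*s,-2*s-1])
--     return nodes
--
-- def colored_edges(genome):
--     edges = []
--     for chromosome in genome:
--         nodes = chromosome_to_cycle(chromosome);
--         nodes.append(nodes[0])
--         for i in range(len(chromosome)):
--             edges.append((nodes[2*i+1],nodes[2*i+2]))
--     return edges
--
-- def cycles(p,q):
--     al,cycles,vis = {},0,set()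
--     for u,v in colored_edges(p)+colored_edges(q):
--         al.setdefault(u,[]).append(v)
--         al.setdefault(v,[]).append(u)
--     def dfs(u):
--         vis.add(u)
--         for v in al[u]:
--             if v not in vis:
--                 dfs(v)
--     for u in range(len(al)):
--         if u+1 in vis: continue
--         dfs(u+1); cycles+=1
--     return cycles
-- ===== SOURCE B (Python) =====
-- def chromosome_to_cycle(c):
--     nodes = []
--     for i,s in enumerate(c):
--         if s > 0: nodes.extend([2*s-1,2*s])
--         else: nodes.extend([-2*s,-2*s-1])
--     return nodes
--
-- def colored_edges(genome):
--     edges = []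
--     for chromosome in genome:
--         nodes = chromosome_to_cycle(chromosome);
--         nodes.append(nodes[0])
--         for i in range(len(chromosome)):
--             edges.append((nodes[2*i+1],nodes[2*i+2]))
--     return edges
--
-- def cycles(p,q):
--     edges = colored_edges(p) + colored_edges(q)
--     label = {}
--     for u,v in edges:
--         label.setdefault(u,u)
--         label.setdefault(v,v)
--     for u,v in edges:
--         lu, lv = label[u], label[v]
--         if lu != lv:
--             for x in label:
--                 if label[x] == lv:
--                     label[x] = lu
--     return len({label[u] for u in range(1, len(label)+1)})
-- ===== Notes on version B (the rewrite author's own statement) =====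
-- stated objective: alternative
-- what changed: Replaced the adjacency-list + recursive-DFS component count with label propagation: every endpoint starts as its own label, each edge merges the two labels by relabelling, and the answer is the number of distinct final labels (no adjacency structure, no recursion).
import Mathlib
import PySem

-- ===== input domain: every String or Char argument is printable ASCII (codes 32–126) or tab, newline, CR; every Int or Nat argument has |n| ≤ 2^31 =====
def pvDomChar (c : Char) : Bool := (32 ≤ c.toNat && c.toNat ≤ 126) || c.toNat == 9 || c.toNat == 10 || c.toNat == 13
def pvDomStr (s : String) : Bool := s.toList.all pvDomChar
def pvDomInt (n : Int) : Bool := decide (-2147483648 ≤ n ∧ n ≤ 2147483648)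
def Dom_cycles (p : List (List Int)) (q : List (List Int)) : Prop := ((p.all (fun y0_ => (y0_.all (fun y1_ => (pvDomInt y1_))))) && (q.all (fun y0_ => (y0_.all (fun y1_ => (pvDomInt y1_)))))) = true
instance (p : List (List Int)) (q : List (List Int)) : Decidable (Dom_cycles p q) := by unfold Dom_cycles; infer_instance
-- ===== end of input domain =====

-- B replaces A's adjacency-list + recursive DFS component count by label propagation
-- (merge labels along every edge, count distinct final labels); same value on Pre_, not faster.

-- ===== PORT A =====
def chromosomeToCycle (c : List Int) : List Int :=
  c.foldl (fun nodes s => if s > 0 then nodes ++ [2*s-1, 2*s] else nodes ++ [-2*s, -2*s-1]) []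

def coloredEdges (genome : List (List Int)) : List (Int × Int) :=
  genome.foldl (fun edges chromosome =>
    let nodes0 := chromosomeToCycle chromosome
    -- nodes.append(nodes[0]): Python's IndexError on an empty chromosome is excluded by Pre_cycles
    let nodes := nodes0 ++ [(PySem.List.pyGet? nodes0 0).getD 0]
    (PySem.List.pyRange 0 (chromosome.length : Int) 1).foldl (fun es i =>
      es ++ [((PySem.List.pyGet? nodes (2*i+1)).getD 0, (PySem.List.pyGet? nodes (2*i+2)).getD 0)]) edges) []

-- Python's recursive dfs; fuel = al.size suffices on Pre_ (recursion only on unvisited vertices)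
def dfsA (al : PySem.Dict Int (List Int)) : Nat → PySem.Set Int → Int → PySem.Set Int
  | 0, vis, _ => vis
  | fuel+1, vis, u =>
    (al.getD u []).foldl (fun vis v => if v ∈ vis then vis else dfsA al fuel vis v)
      (PySem.Set.add vis u)

def cycles (p : List (List Int)) (q : List (List Int)) : Int :=
  let E := coloredEdges p ++ coloredEdges q
  let al := E.foldl (fun d e => (d.modify e.1 [] (· ++ [e.2])).modify e.2 [] (· ++ [e.1]))
      PySem.Dict.empty
  ((PySem.List.pyRange 0 (al.size : Int) 1).foldl
    (fun st u => if u + 1 ∈ st.2 then st else (st.1 + 1, dfsA al al.size st.2 (u + 1)))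
    ((0 : Int), (PySem.Set.empty : PySem.Set Int))).1

-- ===== PORT B =====
def cycles_alt (p : List (List Int)) (q : List (List Int)) : Int :=
  let E := coloredEdges p ++ coloredEdges q
  let label0 := E.foldl (fun d e => (d.setdefault e.1 e.1).setdefault e.2 e.2) PySem.Dict.empty
  let label := E.foldl (fun d e =>
    let lu := d.getD e.1 0
    let lv := d.getD e.2 0
    if lu ≠ lv then
      d.keys.foldl (fun d' x => if d'.getD x 0 = lv then d'.insert x lu else d') d
    else d) label0
  -- {label[u] for u in range(1, len(label)+1)}: label[u] raises KeyError outside Pre_cycles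
  ((PySem.Set.ofList ((PySem.List.pyRange 1 ((label.size : Int) + 1) 1).map
      (fun u => label.getD u 0))).length : Int)

-- ===== PRECONDITION & SPEC =====
-- Pre_cycles holds exactly where Python A returns: every chromosome nonempty (else IndexError in
-- colored_edges) and the breakpoint-graph vertices are exactly {1..N} — i.e. the absolute block
-- values form {1..M} — (else KeyError in dfs; B raises KeyError on those inputs too, when it
-- reads the labels of vertices 1..N).
def pvAbsBlocks (p : List (List Int)) (q : List (List Int)) : List Int :=
  PySem.Set.ofList (((p ++ q).flatMap id).map (fun s => (s.natAbs : Int)))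
def Pre_cycles (p : List (List Int)) (q : List (List Int)) : Prop :=
  (∀ c ∈ p ++ q, c ≠ []) ∧
  (∀ x ∈ pvAbsBlocks p q, 1 ≤ x ∧ x ≤ ((pvAbsBlocks p q).length : Int)) ∧
  (∀ m ∈ PySem.List.pyRange 1 (((pvAbsBlocks p q).length : Int) + 1) 1, m ∈ pvAbsBlocks p q)
instance (p : List (List Int)) (q : List (List Int)) : Decidable (Pre_cycles p q) := by
  unfold Pre_cycles; infer_instance
def pvWitness_cycles : List (List Int) × List (List Int) := ([[1]], [[1]])

def Spec_cycles (p : List (List Int)) (q : List (List Int)) (out : Int) : Prop := out = cycles_alt p q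
instance (p : List (List Int)) (q : List (List Int)) (out : Int) : Decidable (Spec_cycles p q out) := by
  unfold Spec_cycles; infer_instance

-- ===== CLAIM (what is proved, stated in full; the proofs are below) =====
def Claim_equal_cycles : Prop := ∀ (p : List (List Int)) (q : List (List Int)), Dom_cycles p q → Pre_cycles p q → Spec_cycles p q (cycles p q)

-- ===== LEMMAS AND PROOFS =====

-- connectivity of the (undirected, multi-) edge list
def pvAdj (E : List (Int × Int)) (a b : Int) : Prop := (a, b) ∈ E ∨ (b, a) ∈ E
def pvConn (E : List (Int × Int)) : Int → Int → Prop := Relation.ReflTransGen (pvAdj E)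
noncomputable def pvCls (E : List (Int × Int)) (S : Finset Int) (x : Int) : Finset Int :=
  letI : DecidablePred (pvConn E x) := fun _ => Classical.propDecidable _
  S.filter (fun y => pvConn E x y)

def pvEnds (E : List (Int × Int)) : List Int := E.flatMap (fun e => [e.1, e.2])

def alBuild (E : List (Int × Int)) : PySem.Dict Int (List Int) :=
  E.foldl (fun d e => (d.modify e.1 [] (· ++ [e.2])).modify e.2 [] (· ++ [e.1])) PySem.Dict.empty

lemma pvAdj_symm {E : List (Int × Int)} : Symmetric (pvAdj E) := by
  intro a b h; unfold pvAdj at *; tauto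

lemma pvConn_symm {E : List (Int × Int)} {x y : Int} (h : pvConn E x y) : pvConn E y x :=
  Relation.ReflTransGen.symmetric pvAdj_symm h

lemma pvConn_mono {E : List (Int × Int)} {e : Int × Int} {x y : Int}
    (h : pvConn E x y) : pvConn (E ++ [e]) x y := by
  refine Relation.ReflTransGen.mono ?_ h
  intro a b hab; unfold pvAdj at *; rcases hab with h1 | h1
  · exact Or.inl (List.mem_append_left _ h1)
  · exact Or.inr (List.mem_append_left _ h1)

lemma pvConn_append_singleton {E : List (Int × Int)} {u v x y : Int} :
    pvConn (E ++ [(u, v)]) x y ↔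
      pvConn E x y ∨ (pvConn E x u ∧ pvConn E v y) ∨ (pvConn E x v ∧ pvConn E u y) := by
  constructor
  · intro h
    induction h with
    | refl => exact Or.inl Relation.ReflTransGen.refl
    | tail hab hbc ih =>
      rename_i b c
      have hbc' : pvAdj E b c ∨ (b = u ∧ c = v) ∨ (b = v ∧ c = u) := by
        have hsing : ∀ (a b : Int), (a, b) ∈ ([(u, v)] : List (Int × Int)) → a = u ∧ b = v := by
          intro a b h; simp only [List.mem_singleton, Prod.mk.injEq] at h; exact h
        rcases hbc with h1 | h1 <;> rcases List.mem_append.mp h1 with h2 | h2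
        · exact Or.inl (Or.inl h2)
        · rcases hsing _ _ h2 with ⟨h3, h4⟩; exact Or.inr (Or.inl ⟨h3, h4⟩)
        · exact Or.inl (Or.inr h2)
        · rcases hsing _ _ h2 with ⟨h3, h4⟩; exact Or.inr (Or.inr ⟨h4, h3⟩)
      have step : ∀ a b : Int, pvAdj E a b → pvConn E a b := fun a b h =>
        Relation.ReflTransGen.single h
      rcases hbc' with h1 | ⟨hb, hc⟩ | ⟨hb, hc⟩
      · rcases ih with h2 | ⟨h2, h3⟩ | ⟨h2, h3⟩
        · exact Or.inl (h2.tail h1)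
        · exact Or.inr (Or.inl ⟨h2, h3.tail h1⟩)
        · exact Or.inr (Or.inr ⟨h2, h3.tail h1⟩)
      · subst hb; subst hc
        rcases ih with h2 | ⟨h2, h3⟩ | ⟨h2, h3⟩
        · exact Or.inr (Or.inl ⟨h2, Relation.ReflTransGen.refl⟩)
        · exact Or.inr (Or.inl ⟨h2, Relation.ReflTransGen.refl⟩)
        · exact Or.inl h2
      · subst hb; subst hc
        rcases ih with h2 | ⟨h2, h3⟩ | ⟨h2, h3⟩
        · exact Or.inr (Or.inr ⟨h2, Relation.ReflTransGen.refl⟩)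
        · exact Or.inl h2
        · exact Or.inr (Or.inr ⟨h2, Relation.ReflTransGen.refl⟩)
  · intro h
    have hnew : pvConn (E ++ [(u, v)]) u v :=
      Relation.ReflTransGen.single (Or.inl (List.mem_append_right _ (List.mem_singleton_self _)))
    rcases h with h1 | ⟨h1, h2⟩ | ⟨h1, h2⟩
    · exact pvConn_mono h1
    · exact ((pvConn_mono h1).trans hnew).trans (pvConn_mono h2)
    · exact ((pvConn_mono h1).trans (pvConn_symm hnew)).trans (pvConn_mono h2)

lemma pvCls_eq_of_conn {E : List (Int × Int)} {S : Finset Int} {x y : Int}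
    (h : pvConn E x y) : pvCls E S x = pvCls E S y := by
  unfold pvCls
  congr 1
  funext z
  have : pvConn E x z ↔ pvConn E y z :=
    ⟨fun h1 => (pvConn_symm h).trans h1, fun h1 => h.trans h1⟩
  simp only [eq_iff_iff]
  constructor <;> intro h2
  · exact this.mp h2
  · exact this.mpr h2

lemma pvConn_of_cls_eq {E : List (Int × Int)} {S : Finset Int} {x y : Int}
    (hy : y ∈ S) (h : pvCls E S x = pvCls E S y) : pvConn E x y := by
  have hyy : y ∈ pvCls E S y := by
    unfold pvCls; simp only [Finset.mem_filter]; exact ⟨hy, Relation.ReflTransGen.refl⟩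
  rw [← h] at hyy
  unfold pvCls at hyy; simp only [Finset.mem_filter] at hyy
  exact hyy.2

lemma card_image_eq_of_iff {α β γ : Type} [DecidableEq α] [DecidableEq β] [DecidableEq γ]
    (S : Finset α) (f : α → β) (g : α → γ)
    (h : ∀ x ∈ S, ∀ y ∈ S, (f x = f y ↔ g x = g y)) :
    (S.image f).card = (S.image g).card := by
  induction S using Finset.induction_on with
  | empty => simp
  | insert a s ha ih =>
    rw [Finset.image_insert, Finset.image_insert]
    have hmem : f a ∈ s.image f ↔ g a ∈ s.image g := by
      simp only [Finset.mem_image]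
      constructor <;> rintro ⟨x, hx, hfx⟩
      · exact ⟨x, hx, (h x (Finset.mem_insert_of_mem hx) a (Finset.mem_insert_self a s)).mp hfx⟩
      · exact ⟨x, hx, (h x (Finset.mem_insert_of_mem hx) a (Finset.mem_insert_self a s)).mpr hfx⟩
    have ih' := ih (fun x hx y hy =>
      h x (Finset.mem_insert_of_mem hx) y (Finset.mem_insert_of_mem hy))
    by_cases hfa : f a ∈ s.image f
    · rw [Finset.insert_eq_self.mpr hfa, Finset.insert_eq_self.mpr (hmem.mp hfa), ih']
    · rw [Finset.card_insert_of_notMem hfa, Finset.card_insert_of_notMem (fun hg => hfa (hmem.mpr hg)), ih']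

-- ----- the adjacency dict of port A -----

def pvE2 (E : List (Int × Int)) : List (Int × Int) := E.flatMap (fun e => [(e.1, e.2), (e.2, e.1)])

lemma alBuild_eq (E : List (Int × Int)) :
    alBuild E = (pvE2 E).foldl (fun d p => d.modify p.1 [] (· ++ [p.2])) PySem.Dict.empty := by
  unfold alBuild pvE2
  generalize PySem.Dict.empty = d
  induction E generalizing d with
  | nil => rfl
  | cons e E ih => simp [List.flatMap_cons, ih]

lemma mem_pvE2 (E : List (Int × Int)) (u v : Int) :
    (u, v) ∈ pvE2 E ↔ pvAdj E u v := by
  unfold pvE2 pvAdj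
  simp only [List.mem_flatMap, List.mem_cons, Prod.mk.injEq,
    List.not_mem_nil, or_false]
  constructor
  · rintro ⟨e, he, ⟨h1, h2⟩ | ⟨h1, h2⟩⟩
    · left; rw [h1, h2]; simpa using he
    · right; rw [h1, h2]; simpa using he
  · rintro (h | h)
    · exact ⟨(u, v), h, Or.inl ⟨rfl, rfl⟩⟩
    · exact ⟨(v, u), h, Or.inr ⟨rfl, rfl⟩⟩

lemma map_fst_pvE2 (E : List (Int × Int)) : (pvE2 E).map (·.1) = pvEnds E := by
  unfold pvE2 pvEnds
  induction E with
  | nil => rfl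
  | cons e E ih => simp_all

lemma mem_adj_iff (E : List (Int × Int)) (u v : Int) :
    v ∈ (alBuild E).getD u [] ↔ pvAdj E u v := by
  rw [alBuild_eq, PySem.Dict.getD_foldl_modify_append, ← mem_pvE2]
  simp only [PySem.Dict.getD_empty, List.nil_append, List.mem_map, List.mem_filter, beq_iff_eq]
  constructor
  · rintro ⟨p, ⟨hp, h1⟩, h2⟩
    have : p = (u, v) := by cases p; simp_all
    rw [← this]; exact hp
  · intro h; exact ⟨(u, v), ⟨h, rfl⟩, rfl⟩

lemma keys_alBuild (E : List (Int × Int)) :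
    (alBuild E).keys = PySem.Set.ofList (pvEnds E) := by
  rw [alBuild_eq, PySem.Dict.keys_foldl_modify_key (pvE2 E) (·.1) _ _ PySem.Dict.empty]
  rw [map_fst_pvE2]
  simp [PySem.Dict.keys_empty, PySem.Set.update_nil_left]

lemma nodup_keys_alBuild (E : List (Int × Int)) : (alBuild E).keys.Nodup := by
  rw [keys_alBuild]; exact PySem.Set.nodup_ofList _

lemma size_alBuild (E : List (Int × Int)) : (alBuild E).size = (alBuild E).keys.length := by
  simp [PySem.Dict.size, PySem.Dict.keys]

-- ----- endpoint structure of the breakpoint graph -----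

lemma chromosomeToCycle_eq (c : List Int) :
    chromosomeToCycle c
      = c.flatMap (fun s => if s > 0 then [2*s-1, 2*s] else [-2*s, -2*s-1]) := by
  unfold chromosomeToCycle
  have h : ∀ (c : List Int) (acc : List Int),
      c.foldl (fun nodes s => if s > 0 then nodes ++ [2*s-1, 2*s] else nodes ++ [-2*s, -2*s-1]) acc
        = acc ++ c.flatMap (fun s => if s > 0 then [2*s-1, 2*s] else [-2*s, -2*s-1]) := by
    intro c
    induction c with
    | nil => simp
    | cons a c ih =>
      intro acc
      simp only [List.foldl_cons, List.flatMap_cons]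
      rw [ih]
      by_cases ha : a > 0 <;> simp [ha]
  simpa using h c []

lemma length_chromosomeToCycle (c : List Int) :
    (chromosomeToCycle c).length = 2 * c.length := by
  rw [chromosomeToCycle_eq]
  induction c with
  | nil => rfl
  | cons a c ih =>
    simp only [List.flatMap_cons, List.length_append]
    by_cases ha : a > 0 <;> simp [ha] at ih ⊢ <;> omega

lemma mem_chromosomeToCycle (c : List Int) (x : Int) :
    x ∈ chromosomeToCycle c
      ↔ ∃ s ∈ c, x = 2*(s.natAbs : Int) - 1 ∨ x = 2*(s.natAbs : Int) := by
  rw [chromosomeToCycle_eq]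
  simp only [List.mem_flatMap]
  constructor
  · rintro ⟨s, hs, hx⟩
    refine ⟨s, hs, ?_⟩
    by_cases h : s > 0 <;> simp [h, List.mem_cons] at hx <;> rcases hx with h1 | h1 <;> omega
  · rintro ⟨s, hs, hx⟩
    refine ⟨s, hs, ?_⟩
    by_cases h : s > 0 <;> simp [h, List.mem_cons] <;> omega

-- the per-chromosome edge list that coloredEdges appends
def edgesOf (c : List Int) : List (Int × Int) :=
  (PySem.List.pyRange 0 (c.length : Int) 1).map (fun i =>
    ((PySem.List.pyGet? (chromosomeToCycle c ++ [(PySem.List.pyGet? (chromosomeToCycle c) 0).getD 0]) (2*i+1)).getD 0,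
     (PySem.List.pyGet? (chromosomeToCycle c ++ [(PySem.List.pyGet? (chromosomeToCycle c) 0).getD 0]) (2*i+2)).getD 0))

lemma coloredEdges_eq (genome : List (List Int)) :
    coloredEdges genome = genome.flatMap edgesOf := by
  unfold coloredEdges
  have h : ∀ (g : List (List Int)) (acc : List (Int × Int)),
      g.foldl (fun edges chromosome =>
        let nodes0 := chromosomeToCycle chromosome
        let nodes := nodes0 ++ [(PySem.List.pyGet? nodes0 0).getD 0]
        (PySem.List.pyRange 0 (chromosome.length : Int) 1).foldl (fun es i =>
          es ++ [((PySem.List.pyGet? nodes (2*i+1)).getD 0, (PySem.List.pyGet? nodes (2*i+2)).getD 0)]) edges) acc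
        = acc ++ g.flatMap edgesOf := by
    intro g
    induction g with
    | nil => simp
    | cons c g ih =>
      intro acc
      simp only [List.foldl_cons, List.flatMap_cons]
      rw [PySem.List.foldl_append_singleton_eq_map, ih]
      simp [edgesOf]
  simpa using h genome []

lemma flatMap_range_getD (L : List Int) :
    ∀ (k : Nat), 2*k + 1 ≤ L.length →
      (List.range k).flatMap (fun i => [L.getD (2*i+1) 0, L.getD (2*i+2) 0])
        = (L.drop 1).take (2*k) := by
  intro k
  induction k with
  | zero => simp
  | succ k ih =>
    intro hk
    rw [List.range_succ, List.flatMap_append, ih (by omega)]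
    simp only [List.flatMap_cons, List.flatMap_nil, List.append_nil]
    have hd : (L.drop 1).length = L.length - 1 := by simp
    have h1 : 2*k < (L.drop 1).length := by omega
    have h2 : 2*k + 1 < (L.drop 1).length := by omega
    have e1 : L.getD (2*(k : Nat)+1) 0 = (L.drop 1).getD (2*k) 0 := by
      rw [List.getD_eq_getElem L 0 (by omega), List.getD_eq_getElem _ 0 h1, List.getElem_drop]
      congr 1
      omega
    have e2 : L.getD (2*(k : Nat)+2) 0 = (L.drop 1).getD (2*k+1) 0 := by
      rw [List.getD_eq_getElem L 0 (by omega), List.getD_eq_getElem _ 0 h2, List.getElem_drop]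
      congr 1
      omega
    rw [e1, e2]
    have t1 : (L.drop 1).take (2*k+1) = (L.drop 1).take (2*k) ++ [(L.drop 1).getD (2*k) 0] := by
      rw [List.take_add_one, List.getElem?_eq_getElem h1, List.getD_eq_getElem _ 0 h1]; rfl
    have t2 : (L.drop 1).take (2*k+2) = (L.drop 1).take (2*k+1) ++ [(L.drop 1).getD (2*k+1) 0] := by
      rw [show 2*k+2 = (2*k+1)+1 by omega, List.take_add_one, List.getElem?_eq_getElem h2,
        List.getD_eq_getElem _ 0 h2]; rfl
    rw [show 2*(k+1) = 2*k+2 by omega, t2, t1]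
    simp

lemma mem_pvEnds_edgesOf (c : List Int) (x : Int) :
    x ∈ pvEnds (edgesOf c) ↔ x ∈ chromosomeToCycle c := by
  rcases List.eq_nil_or_concat c with hc | ⟨_, _, hc⟩
  · subst hc; simp [pvEnds, edgesOf, chromosomeToCycle]
  · have hne : c ≠ [] := by rw [hc]; simp
    set nodes0 := chromosomeToCycle c with hn0
    have hlen : nodes0.length = 2 * c.length := length_chromosomeToCycle c
    have hpos : 0 < c.length := List.length_pos_of_ne_nil hne
    have hn0ne : nodes0 ≠ [] := by
      intro h
      have h2 := hlen
      rw [h] at h2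
      simp only [List.length_nil] at h2
      omega
    set nodes := nodes0 ++ [(PySem.List.pyGet? nodes0 0).getD 0] with hn
    have hlen' : nodes.length = 2 * c.length + 1 := by rw [hn]; simp [hlen]
    have hends : pvEnds (edgesOf c)
        = (List.range c.length).flatMap (fun i => [nodes.getD (2*i+1) 0, nodes.getD (2*i+2) 0]) := by
      unfold pvEnds edgesOf
      rw [← hn0, ← hn, PySem.List.pyRange_zero_nat, List.flatMap_map, List.flatMap_map]
      congr 1
      funext i
      have c1 : (2*(i:Int)+1) = ((2*i+1 : Nat) : Int) := by push_cast; ring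
      have c2 : (2*(i:Int)+2) = ((2*i+2 : Nat) : Int) := by push_cast; ring
      simp only [c1, c2, PySem.List.pyGet?_natCast]
      rfl
    rw [hends, flatMap_range_getD nodes c.length (by omega)]
    have hget0' : (PySem.List.pyGet? nodes0 0).getD 0 = nodes0.getD 0 0 := by
      rw [show (0:Int) = ((0:Nat):Int) by norm_num, PySem.List.pyGet?_natCast]
      rfl
    have hdrop : nodes.drop 1 = nodes0.drop 1 ++ [nodes0.getD 0 0] := by
      rw [hn, hget0', List.drop_append_of_le_length (by omega)]
    have htake : (nodes.drop 1).take (2*c.length) = nodes.drop 1 := by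
      apply List.take_of_length_le
      simp [hlen']
    rw [htake, hdrop]
    have hcons : nodes0.getD 0 0 :: nodes0.drop 1 = nodes0 := by
      rw [List.getD_eq_getElem _ 0 (by omega)]
      have h0 := List.getElem_cons_drop (show 0 < nodes0.length by omega)
      simpa using h0
    rw [← hcons]
    simp only [List.mem_append, List.mem_cons]
    tauto

lemma mem_pvEnds_coloredEdges (p q : List (List Int)) (x : Int) :
    x ∈ pvEnds (coloredEdges p ++ coloredEdges q)
      ↔ ∃ s ∈ (p ++ q).flatMap id, x = 2*(s.natAbs : Int) - 1 ∨ x = 2*(s.natAbs : Int) := by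
  unfold pvEnds
  rw [coloredEdges_eq, coloredEdges_eq, ← List.flatMap_append, List.flatMap_assoc]
  constructor
  · intro hx
    rcases List.mem_flatMap.mp hx with ⟨c, hc, hxc⟩
    have hx' : x ∈ pvEnds (edgesOf c) := hxc
    rw [mem_pvEnds_edgesOf, mem_chromosomeToCycle] at hx'
    rcases hx' with ⟨s, hs, hxs⟩
    exact ⟨s, List.mem_flatMap.mpr ⟨c, hc, hs⟩, hxs⟩
  · rintro ⟨s, hs, hxs⟩
    rcases List.mem_flatMap.mp hs with ⟨c, hc, hsc⟩
    apply List.mem_flatMap.mpr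
    refine ⟨c, hc, ?_⟩
    have hx' : x ∈ pvEnds (edgesOf c) := by
      rw [mem_pvEnds_edgesOf, mem_chromosomeToCycle]
      exact ⟨s, hsc, hxs⟩
    exact hx'

-- under Pre_, the endpoints are exactly 1..2M
lemma mem_pvEnds_iff_of_pre (p q : List (List Int)) (hpre : Pre_cycles p q) (x : Int) :
    x ∈ pvEnds (coloredEdges p ++ coloredEdges q)
      ↔ 1 ≤ x ∧ x ≤ 2 * ((pvAbsBlocks p q).length : Int) := by
  obtain ⟨-, h1, h2⟩ := hpre
  rw [mem_pvEnds_coloredEdges]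
  constructor
  · rintro ⟨s, hs, hxs⟩
    have hmem : (s.natAbs : Int) ∈ pvAbsBlocks p q := by
      unfold pvAbsBlocks
      rw [PySem.Set.mem_ofList]
      exact List.mem_map.mpr ⟨s, hs, rfl⟩
    have := h1 _ hmem
    omega
  · rintro ⟨hx1, hx2⟩
    rcases Int.even_or_odd x with ⟨m, hm⟩ | ⟨m, hm⟩
    · have hmB : m ∈ pvAbsBlocks p q := by
        apply h2
        rw [PySem.List.mem_pyRange_one]
        omega
      unfold pvAbsBlocks at hmB
      rw [PySem.Set.mem_ofList] at hmB
      rcases List.mem_map.mp hmB with ⟨s, hs, hsm⟩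
      exact ⟨s, hs, by omega⟩
    · have hmB : m + 1 ∈ pvAbsBlocks p q := by
        apply h2
        rw [PySem.List.mem_pyRange_one]
        omega
      unfold pvAbsBlocks at hmB
      rw [PySem.Set.mem_ofList] at hmB
      rcases List.mem_map.mp hmB with ⟨s, hs, hsm⟩
      exact ⟨s, hs, by omega⟩

lemma mem_keys_alBuild_iff (E : List (Int × Int)) (x : Int) :
    x ∈ (alBuild E).keys ↔ x ∈ pvEnds E := by
  rw [keys_alBuild, PySem.Set.mem_ofList]

lemma adj_mem_keys (E : List (Int × Int)) :
    ∀ x w, w ∈ (alBuild E).getD x [] → w ∈ (alBuild E).keys := by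
  intro x w hw
  rw [mem_adj_iff] at hw
  rw [mem_keys_alBuild_iff]
  unfold pvEnds pvAdj at *
  rcases hw with h | h
  · exact List.mem_flatMap.mpr ⟨(x, w), h, by simp⟩
  · exact List.mem_flatMap.mpr ⟨(w, x), h, by simp⟩

lemma reach_iff_conn (E : List (Int × Int)) (u x : Int) :
    Relation.ReflTransGen (fun a b : Int => b ∈ (alBuild E).getD a []) u x ↔ pvConn E u x := by
  constructor
  · intro h
    exact Relation.ReflTransGen.mono (fun a b hab => (mem_adj_iff E a b).mp hab) h
  · intro h
    exact Relation.ReflTransGen.mono (fun a b hab => (mem_adj_iff E a b).mpr hab) h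

lemma filter_length_mono (l : List Int) (p q : Int → Bool) (h : ∀ x ∈ l, p x = true → q x = true) :
    (l.filter p).length ≤ (l.filter q).length := by
  rw [← List.countP_eq_length_filter, ← List.countP_eq_length_filter]
  exact List.countP_mono_left h

lemma filter_not_mem_lt (l : List Int) (hnd : l.Nodup) (vis s : List Int)
    (hsub : ∀ x ∈ vis, x ∈ s) (u : Int) (hu : u ∈ l) (huv : u ∉ vis) (hus : u ∈ s) :
    (l.filter (fun x => !decide (x ∈ s))).length < (l.filter (fun x => !decide (x ∈ vis))).length := by
  have hmono : ∀ (l' : List Int),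
      (l'.filter (fun x => !decide (x ∈ s))).length ≤ (l'.filter (fun x => !decide (x ∈ vis))).length := by
    intro l'
    refine filter_length_mono l' _ _ ?_
    intro x _ hx
    simp only [Bool.not_eq_eq_eq_not, Bool.not_true, decide_eq_false_iff_not] at hx ⊢
    exact fun hv => hx (hsub x hv)
  induction l with
  | nil => cases hu
  | cons a l ih =>
    rcases List.nodup_cons.mp hnd with ⟨hal, hl⟩
    simp only [List.filter_cons]
    by_cases hua : u = a
    · subst hua
      simp only [List.length_cons, hus, huv, decide_true, decide_false, Bool.not_true,
        Bool.not_false, Bool.false_eq_true, if_false, if_true]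
      exact Nat.lt_succ_of_le (hmono l)
    · have hu' : u ∈ l := (List.mem_cons.mp hu).resolve_left hua
      have hlt := ih hl hu'
      by_cases has : a ∈ s
      · by_cases hav : a ∈ vis
        · simpa [has, hav] using hlt
        · simp only [List.length_cons, has, hav, decide_true, decide_false, Bool.not_true,
            Bool.not_false, Bool.false_eq_true, if_false, if_true]
          omega
      · have hav : a ∉ vis := fun hv => has (hsub a hv)
        simp only [List.length_cons, has, hav, decide_false, Bool.not_false, if_true]
        omega

lemma dfsA_spec (al : PySem.Dict Int (List Int)) (Hnd : al.keys.Nodup)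
    (Hc : ∀ x w, w ∈ al.getD x [] → w ∈ al.keys) :
    ∀ (fuel : Nat) (u : Int) (vis : PySem.Set Int), u ∈ al.keys → u ∉ vis →
    (al.keys.filter (fun x => !decide (x ∈ vis))).length ≤ fuel →
    (∀ x ∈ vis, x ∈ dfsA al fuel vis u) ∧ u ∈ dfsA al fuel vis u ∧
    (∀ x ∈ dfsA al fuel vis u, x ∈ vis ∨ Relation.ReflTransGen (fun a b => b ∈ al.getD a []) u x) ∧
    (∀ x ∈ dfsA al fuel vis u, x ∉ vis → ∀ w ∈ al.getD x [], w ∈ dfsA al fuel vis u) := by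
  intro fuel
  induction fuel with
  | zero =>
    intro u vis hu huv hf
    exfalso
    have hmem : u ∈ al.keys.filter (fun x => !decide (x ∈ vis)) := by
      simp only [List.mem_filter, Bool.not_eq_eq_eq_not, Bool.not_true, decide_eq_false_iff_not]
      exact ⟨hu, huv⟩
    have := List.length_pos_of_mem hmem
    omega
  | succ fuel ih =>
    intro u vis hu huv hf
    simp only [dfsA]
    -- J is the invariant of the neighbour fold
    set reach := Relation.ReflTransGen (fun a b : Int => b ∈ al.getD a []) with hreach
    have key : ∀ (l : List Int), (∀ v ∈ l, v ∈ al.getD u []) →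
        ∀ (s : PySem.Set Int),
        (∀ x ∈ vis, x ∈ s) → u ∈ s →
        (∀ x ∈ s, x ∈ vis ∨ reach u x) →
        (∀ x ∈ s, x ∉ vis → x ≠ u → ∀ w ∈ al.getD x [], w ∈ s) →
        (∀ x ∈ s, x ∈ l.foldl (fun vis v => if v ∈ vis then vis else dfsA al fuel vis v) s) ∧
        (∀ v ∈ l, v ∈ l.foldl (fun vis v => if v ∈ vis then vis else dfsA al fuel vis v) s) ∧
        (∀ x ∈ l.foldl (fun vis v => if v ∈ vis then vis else dfsA al fuel vis v) s,
          x ∈ vis ∨ reach u x) ∧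
        (∀ x ∈ l.foldl (fun vis v => if v ∈ vis then vis else dfsA al fuel vis v) s,
          x ∉ vis → x ≠ u → ∀ w ∈ al.getD x [], w ∈
            l.foldl (fun vis v => if v ∈ vis then vis else dfsA al fuel vis v) s) := by
      intro l
      induction l with
      | nil =>
        intro _ s h1 h2 h3 h4
        exact ⟨fun x hx => hx, by simp, h3, fun x hx h5 h6 => h4 x hx h5 h6⟩
      | cons v l ihl =>
        intro hl s h1 h2 h3 h4
        simp only [List.foldl_cons]
        by_cases hvs : v ∈ s
        · simp only [hvs, if_true]
          obtain ⟨k1, k2, k3, k4⟩ := ihl (fun w hw => hl w (List.mem_cons_of_mem _ hw)) s h1 h2 h3 h4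
          refine ⟨k1, ?_, k3, k4⟩
          intro w hw
          rcases List.mem_cons.mp hw with h | h
          · exact h ▸ k1 v hvs
          · exact k2 w h
        · simp only [hvs, if_false]
          have hvadj : v ∈ al.getD u [] := hl v List.mem_cons_self
          have hvk : v ∈ al.keys := Hc u v hvadj
          have hfuel' : (al.keys.filter (fun x => !decide (x ∈ s))).length ≤ fuel := by
            have := filter_not_mem_lt al.keys Hnd vis s h1 u hu huv h2
            omega
          obtain ⟨a1, a2, a3, a4⟩ := ih v s hvk hvs hfuel'
          set r := dfsA al fuel s v with hr
          have hJ1 : ∀ x ∈ vis, x ∈ r := fun x hx => a1 x (h1 x hx)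
          have hJ2 : u ∈ r := a1 u h2
          have hJ3 : ∀ x ∈ r, x ∈ vis ∨ reach u x := by
            intro x hx
            rcases a3 x hx with h | h
            · exact h3 x h
            · exact Or.inr (Relation.ReflTransGen.head hvadj h)
          have hJ4 : ∀ x ∈ r, x ∉ vis → x ≠ u → ∀ w ∈ al.getD x [], w ∈ r := by
            intro x hx hxv hxu w hw
            by_cases hxs : x ∈ s
            · exact a1 w (h4 x hxs hxv hxu w hw)
            · exact a4 x hx hxs w hw
          obtain ⟨k1, k2, k3, k4⟩ := ihl (fun w hw => hl w (List.mem_cons_of_mem _ hw)) r hJ1 hJ2 hJ3 hJ4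
          refine ⟨fun x hx => k1 x (a1 x hx), ?_, k3, k4⟩
          intro w hw
          rcases List.mem_cons.mp hw with h | h
          · subst h; exact k1 w a2
          · exact k2 w h
    have hJ0 : ∀ x ∈ PySem.Set.add vis u, x ∈ vis ∨ x = u := by
      intro x hx; exact (PySem.Set.mem_add _ _ _).mp hx
    obtain ⟨k1, k2, k3, k4⟩ := key (al.getD u []) (fun v hv => hv) (PySem.Set.add vis u)
      (fun x hx => (PySem.Set.mem_add _ _ _).mpr (Or.inl hx))
      ((PySem.Set.mem_add _ _ _).mpr (Or.inr rfl))
      (by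
        intro x hx
        rcases hJ0 x hx with h | h
        · exact Or.inl h
        · subst h; exact Or.inr Relation.ReflTransGen.refl)
      (by
        intro x hx hxv hxu
        rcases hJ0 x hx with h | h
        · exact absurd h hxv
        · exact absurd h hxu)
    refine ⟨fun x hx => k1 x ((PySem.Set.mem_add _ _ _).mpr (Or.inl hx)),
      k1 u ((PySem.Set.mem_add _ _ _).mpr (Or.inr rfl)), k3, ?_⟩
    intro x hx hxv w hw
    by_cases hxu : x = u
    · subst hxu; exact k2 w hw
    · exact k4 x hx hxv hxu w hw

lemma dfsA_mem_iff (al : PySem.Dict Int (List Int)) (Hnd : al.keys.Nodup)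
    (Hc : ∀ x w, w ∈ al.getD x [] → w ∈ al.keys)
    (fuel : Nat) (u : Int) (vis : PySem.Set Int) (hu : u ∈ al.keys) (huv : u ∉ vis)
    (hcl : ∀ x ∈ vis, ∀ w ∈ al.getD x [], w ∈ vis)
    (hfuel : (al.keys.filter (fun x => !decide (x ∈ vis))).length ≤ fuel) :
    ∀ x, x ∈ dfsA al fuel vis u ↔
      x ∈ vis ∨ Relation.ReflTransGen (fun a b : Int => b ∈ al.getD a []) u x := by
  obtain ⟨ha, hb, hchar, hclos⟩ := dfsA_spec al Hnd Hc fuel u vis hu huv hfuel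
  intro x
  constructor
  · exact fun h => hchar x h
  · rintro (h | h)
    · exact ha x h
    · induction h with
      | refl => exact hb
      | tail hab hbc ihh =>
        rename_i b c
        by_cases hbv : b ∈ vis
        · exact ha c (hcl b hbv c hbc)
        · exact hclos b ihh hbv c hbc

-- ----- the main loop of port A counts the classes of {1..N} -----

lemma Aloop (E : List (Int × Int)) (N : Nat)
    (hkeys : ∀ x : Int, x ∈ (alBuild E).keys ↔ 1 ≤ x ∧ x ≤ (N : Int)) :
    ∀ k : Nat, k ≤ N →
    (∀ x, x ∈ ((PySem.List.pyRange 0 (k : Int) 1).foldl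
        (fun st u => if u + 1 ∈ st.2 then st
          else (st.1 + 1, dfsA (alBuild E) (alBuild E).size st.2 (u + 1)))
        ((0 : Int), (PySem.Set.empty : PySem.Set Int))).2
      ↔ ∃ j : Int, 1 ≤ j ∧ j ≤ (k : Int) ∧ pvConn E j x) ∧
    ((PySem.List.pyRange 0 (k : Int) 1).foldl
        (fun st u => if u + 1 ∈ st.2 then st
          else (st.1 + 1, dfsA (alBuild E) (alBuild E).size st.2 (u + 1)))
        ((0 : Int), (PySem.Set.empty : PySem.Set Int))).1
      = (((Finset.Icc (1 : Int) (k : Int)).image (pvCls E (Finset.Icc (1 : Int) (N : Int)))).card : Int) := by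
  intro k
  induction k with
  | zero =>
    intro _
    rw [PySem.List.pyRange_one_eq_nil (by norm_num)]
    constructor
    · intro x
      simp only [List.foldl_nil]
      constructor
      · intro h; exact absurd h (by simp [PySem.Set.empty])
      · rintro ⟨j, hj1, hj2, -⟩; omega
    · simp only [List.foldl_nil]
      rw [show Finset.Icc (1:Int) ((0:Nat):Int) = ∅ from Finset.Icc_eq_empty (by norm_num)]
      simp
  | succ k ih =>
    intro hk
    obtain ⟨ihv, ihc⟩ := ih (by omega)
    have hsplit : PySem.List.pyRange 0 ((k+1 : Nat) : Int) 1
        = PySem.List.pyRange 0 (k : Int) 1 ++ [(k : Int)] := by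
      rw [show ((k+1 : Nat) : Int) = (k : Int) + 1 by push_cast; ring]
      exact PySem.List.pyRange_one_succ_right (by positivity)
    rw [hsplit, List.foldl_append]
    set st := (PySem.List.pyRange 0 (k : Int) 1).foldl
        (fun st u => if u + 1 ∈ st.2 then st
          else (st.1 + 1, dfsA (alBuild E) (alBuild E).size st.2 (u + 1)))
        ((0 : Int), (PySem.Set.empty : PySem.Set Int)) with hst
    simp only [List.foldl_cons, List.foldl_nil]
    have hicc : Finset.Icc (1:Int) ((k+1:Nat):Int)
        = insert ((k:Int)+1) (Finset.Icc (1:Int) (k:Int)) := by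
      ext y
      simp only [Finset.mem_Icc, Finset.mem_insert]
      push_cast
      omega
    by_cases hvis : (k : Int) + 1 ∈ st.2
    · simp only [hvis, if_true]
      rcases (ihv _).mp hvis with ⟨j, hj1, hj2, hconn⟩
      constructor
      · intro x
        rw [ihv x]
        constructor
        · rintro ⟨j', h1, h2, h3⟩; exact ⟨j', h1, by push_cast; omega, h3⟩
        · rintro ⟨j', h1, h2, h3⟩
          by_cases hj' : j' ≤ (k : Int)
          · exact ⟨j', h1, hj', h3⟩
          · have : j' = (k:Int) + 1 := by push_cast at h2; omega
            subst this
            exact ⟨j, hj1, hj2, hconn.trans h3⟩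
      · rw [ihc, hicc]
        have : pvCls E (Finset.Icc (1:Int) (N:Int)) ((k:Int)+1)
            ∈ (Finset.Icc (1:Int) (k:Int)).image (pvCls E (Finset.Icc (1:Int) (N:Int))) := by
          apply Finset.mem_image.mpr
          exact ⟨j, Finset.mem_Icc.mpr ⟨hj1, hj2⟩, pvCls_eq_of_conn hconn⟩
        rw [Finset.image_insert, Finset.insert_eq_self.mpr this]
    · simp only [hvis, if_false]
      have hNnd := nodup_keys_alBuild E
      have hHc := adj_mem_keys E
      have hu : (k:Int) + 1 ∈ (alBuild E).keys := by
        rw [hkeys]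
        constructor <;> [omega; push_cast]
        omega
      have hclosed : ∀ x ∈ st.2, ∀ w ∈ (alBuild E).getD x [], w ∈ st.2 := by
        intro x hx w hw
        rcases (ihv x).mp hx with ⟨j, h1, h2, h3⟩
        refine (ihv w).mpr ⟨j, h1, h2, h3.tail ?_⟩
        exact (mem_adj_iff E x w).mp hw
      have hfuel : ((alBuild E).keys.filter (fun x => !decide (x ∈ st.2))).length
          ≤ (alBuild E).size := by
        rw [size_alBuild]
        exact List.length_filter_le _ _
      have hmem := dfsA_mem_iff (alBuild E) hNnd hHc (alBuild E).size ((k:Int)+1) st.2 hu hvis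
        hclosed hfuel
      constructor
      · intro x
        rw [hmem x, ihv x, reach_iff_conn]
        constructor
        · rintro (⟨j, h1, h2, h3⟩ | h)
          · exact ⟨j, h1, by push_cast; omega, h3⟩
          · exact ⟨(k:Int)+1, by omega, by push_cast; omega, h⟩
        · rintro ⟨j, h1, h2, h3⟩
          by_cases hj' : j ≤ (k : Int)
          · exact Or.inl ⟨j, h1, hj', h3⟩
          · have : j = (k:Int) + 1 := by push_cast at h2; omega
            subst this
            exact Or.inr h3
      · simp only [ihc, hicc]
        have hnotmem : pvCls E (Finset.Icc (1:Int) (N:Int)) ((k:Int)+1)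
            ∉ (Finset.Icc (1:Int) (k:Int)).image (pvCls E (Finset.Icc (1:Int) (N:Int))) := by
          intro hmem'
          rcases Finset.mem_image.mp hmem' with ⟨j, hj, hcls⟩
          rcases Finset.mem_Icc.mp hj with ⟨hj1, hj2⟩
          have hjS : j ∈ Finset.Icc (1:Int) (N:Int) := Finset.mem_Icc.mpr ⟨hj1, by omega⟩
          have hconn := pvConn_of_cls_eq hjS hcls.symm
          exact hvis ((ihv _).mpr ⟨j, hj1, hj2, pvConn_symm hconn⟩)
        rw [Finset.image_insert, Finset.card_insert_of_notMem hnotmem]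
        push_cast
        ring

-- ----- label propagation of port B -----

lemma labInit_spec : ∀ (E : List (Int × Int)) (d : PySem.Dict Int Int), d.keys.Nodup →
    (∀ x ∈ d.keys, d.getD x 0 = x) →
    (E.foldl (fun d e => (d.setdefault e.1 e.1).setdefault e.2 e.2) d).keys
        = PySem.Set.update d.keys (pvEnds E) ∧
    (E.foldl (fun d e => (d.setdefault e.1 e.1).setdefault e.2 e.2) d).keys.Nodup ∧
    (∀ x ∈ (E.foldl (fun d e => (d.setdefault e.1 e.1).setdefault e.2 e.2) d).keys,
      (E.foldl (fun d e => (d.setdefault e.1 e.1).setdefault e.2 e.2) d).getD x 0 = x) := by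
  have sd : ∀ (d : PySem.Dict Int Int) (u : Int), d.keys.Nodup → (∀ x ∈ d.keys, d.getD x 0 = x) →
      (d.setdefault u u).keys = PySem.Set.add d.keys u ∧ (d.setdefault u u).keys.Nodup ∧
      (∀ x ∈ (d.setdefault u u).keys, (d.setdefault u u).getD x 0 = x) := by
    intro d u hnd hinv
    by_cases hc : d.contains u = true
    · rw [PySem.Dict.setdefault_of_contains d u hc]
      have hmem : u ∈ d.keys := (PySem.Dict.contains_iff_mem_keys d u).mp hc
      rw [PySem.Set.add_of_mem hmem]
      exact ⟨rfl, hnd, hinv⟩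
    · have hc' : d.contains u = false := by
        cases h : d.contains u
        · rfl
        · exact absurd h hc
      rw [PySem.Dict.setdefault_of_not_contains d u hc']
      have hmem : u ∉ d.keys := fun h =>
        (by rw [(PySem.Dict.contains_iff_mem_keys d u).mpr h] at hc'; exact Bool.true_eq_false.mp hc')
      constructor
      · rw [PySem.Dict.keys_insert_of_not_contains d u hc', PySem.Set.add_of_not_mem hmem]
      constructor
      · rw [PySem.Dict.keys_insert_of_not_contains d u hc']
        exact List.Nodup.append hnd (List.nodup_singleton u) (by simpa using hmem)
      · intro x hx
        rw [PySem.Dict.getD_insert]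
        by_cases hxu : x = u
        · simp [hxu]
        · rw [if_neg hxu]
          apply hinv
          rw [PySem.Dict.keys_insert_of_not_contains d u hc'] at hx
          rcases List.mem_append.mp hx with h | h
          · exact h
          · simp at h; exact absurd h hxu
  intro E
  induction E with
  | nil =>
    intro d hnd hinv
    simp only [List.foldl_nil]
    exact ⟨by simp [pvEnds, PySem.Set.update_nil], hnd, hinv⟩
  | cons e E ih =>
    intro d hnd hinv
    obtain ⟨s1, s2, s3⟩ := sd d e.1 hnd hinv
    obtain ⟨t1, t2, t3⟩ := sd (d.setdefault e.1 e.1) e.2 s2 s3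
    simp only [List.foldl_cons]
    obtain ⟨r1, r2, r3⟩ := ih ((d.setdefault e.1 e.1).setdefault e.2 e.2) t2 t3
    refine ⟨?_, r2, r3⟩
    rw [r1, t1, s1]
    show _ = PySem.Set.update d.keys (e.1 :: e.2 :: pvEnds E)
    rw [PySem.Set.update_cons, PySem.Set.update_cons]

lemma merge_fold (lv lu : Int) : ∀ (l : List Int) (d : PySem.Dict Int Int), l.Nodup →
    (∀ x ∈ l, x ∈ d.keys) →
    ((l.foldl (fun d' x => if d'.getD x 0 = lv then d'.insert x lu else d') d).keys = d.keys) ∧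
    (∀ x, (l.foldl (fun d' x => if d'.getD x 0 = lv then d'.insert x lu else d') d).getD x 0
      = if x ∈ l ∧ d.getD x 0 = lv then lu else d.getD x 0) := by
  intro l
  induction l with
  | nil => intro d _ _; simp
  | cons a l ih =>
    intro d hnd hsub
    rcases List.nodup_cons.mp hnd with ⟨hal, hl⟩
    have ha : a ∈ d.keys := hsub a List.mem_cons_self
    simp only [List.foldl_cons]
    set d1 := if d.getD a 0 = lv then d.insert a lu else d with hd1
    have hd1keys : d1.keys = d.keys := by
      rw [hd1]
      split_ifs
      · exact PySem.Dict.keys_insert_of_contains d lu ((PySem.Dict.contains_iff_mem_keys d a).mpr ha)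
      · rfl
    have hd1get : ∀ x, d1.getD x 0 = if x = a ∧ d.getD a 0 = lv then lu else d.getD x 0 := by
      intro x
      rw [hd1]
      by_cases h1 : d.getD a 0 = lv
      · rw [if_pos h1, PySem.Dict.getD_insert]
        by_cases hx : x = a
        · rw [if_pos hx, if_pos ⟨hx, h1⟩]
        · rw [if_neg hx, if_neg (fun h => hx h.1)]
      · rw [if_neg h1, if_neg (fun h => h1 h.2)]
    obtain ⟨k1, k2⟩ := ih d1 hl (fun x hx => by rw [hd1keys]; exact hsub x (List.mem_cons_of_mem _ hx))
    constructor
    · rw [k1, hd1keys]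
    · intro x
      rw [k2 x, hd1get x]
      by_cases hxa : x = a
      · subst hxa
        have hxl : x ∉ l := hal
        by_cases hv : d.getD x 0 = lv
        · simp [hv, hxl]
        · simp [hv, hxl]
      · by_cases hxl : x ∈ l
        · simp [hxa, hxl]
        · simp [hxa, hxl]

lemma Bloop (K : List Int) (hK : K.Nodup) :
    ∀ (R D : List (Int × Int)) (d : PySem.Dict Int Int), d.keys = K →
    (∀ e ∈ R, e.1 ∈ K ∧ e.2 ∈ K) →
    (∀ x ∈ K, ∀ y ∈ K, (d.getD x 0 = d.getD y 0 ↔ pvConn D x y)) →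
    (R.foldl (fun d e =>
      let lu := d.getD e.1 0
      let lv := d.getD e.2 0
      if lu ≠ lv then
        d.keys.foldl (fun d' x => if d'.getD x 0 = lv then d'.insert x lu else d') d
      else d) d).keys = K ∧
    (∀ x ∈ K, ∀ y ∈ K,
      ((R.foldl (fun d e =>
        let lu := d.getD e.1 0
        let lv := d.getD e.2 0
        if lu ≠ lv then
          d.keys.foldl (fun d' x => if d'.getD x 0 = lv then d'.insert x lu else d') d
        else d) d).getD x 0
      = (R.foldl (fun d e =>
        let lu := d.getD e.1 0
        let lv := d.getD e.2 0
        if lu ≠ lv then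
          d.keys.foldl (fun d' x => if d'.getD x 0 = lv then d'.insert x lu else d') d
        else d) d).getD y 0 ↔ pvConn (D ++ R) x y)) := by
  intro R
  induction R with
  | nil =>
    intro D d hkeys hR hinv
    simp only [List.foldl_nil, List.append_nil]
    exact ⟨hkeys, hinv⟩
  | cons e R ih =>
    intro D d hkeys hR hinv
    obtain ⟨heu, hev⟩ := hR e List.mem_cons_self
    simp only [List.foldl_cons]
    have hassoc : D ++ e :: R = (D ++ [e]) ++ R := by simp
    rw [hassoc]
    set u := e.1 with hu
    set v := e.2 with hv
    set lu := d.getD u 0 with hlu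
    set lv := d.getD v 0 with hlv
    by_cases hne : lu ≠ lv
    · rw [if_pos hne]
      obtain ⟨m1, m2⟩ := merge_fold lv lu d.keys d (hkeys ▸ hK)
        (fun x hx => hx)
      have hg1 : ∀ x ∈ K, (d.keys.foldl (fun d' x => if d'.getD x 0 = lv then d'.insert x lu else d') d).getD x 0
          = if d.getD x 0 = lv then lu else d.getD x 0 := by
        intro x hx
        rw [m2 x]
        rw [hkeys]
        by_cases hv' : d.getD x 0 = lv
        · simp [hx, hv']
        · simp [hx, hv']
      apply ih (D ++ [e]) _ (by rw [m1, hkeys]) (fun e' he' => hR e' (List.mem_cons_of_mem _ he'))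
      -- the merged labels describe connectivity of D ++ [e]
      intro x hx y hy
      rw [hg1 x hx, hg1 y hy]
      have hconnuvx : ∀ z ∈ K, (d.getD z 0 = lv ↔ pvConn D z v) := fun z hz => hinv z hz v hev
      have hconnu : ∀ z ∈ K, (d.getD z 0 = lu ↔ pvConn D z u) := fun z hz => hinv z hz u heu
      have hjoin : pvConn (D ++ [(u, v)]) x y
          ↔ pvConn D x y ∨ (pvConn D x u ∧ pvConn D v y) ∨ (pvConn D x v ∧ pvConn D u y) :=
        pvConn_append_singleton
      rw [show (D ++ [e]) = D ++ [(u, v)] by rw [hu, hv]]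
      rw [hjoin]
      by_cases hx' : d.getD x 0 = lv <;> by_cases hy' : d.getD y 0 = lv
      · -- both relabelled to lu
        rw [if_pos hx', if_pos hy']
        have hcx := (hconnuvx x hx).mp hx'
        have hcy := (hconnuvx y hy).mp hy'
        constructor
        · intro _; exact Or.inl (hcx.trans (pvConn_symm hcy))
        · intro _; rfl
      · -- x relabelled, y not
        rw [if_pos hx', if_neg hy']
        have hcx := (hconnuvx x hx).mp hx'
        constructor
        · intro h
          exact Or.inr (Or.inr ⟨hcx, pvConn_symm ((hconnu y hy).mp h.symm)⟩)
        · rintro (h | ⟨h1, h2⟩ | ⟨h1, h2⟩)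
          · exact absurd ((hconnuvx y hy).mpr ((pvConn_symm h).trans hcx)) hy'
          · exact absurd ((hconnuvx y hy).mpr (pvConn_symm h2)) hy'
          · exact ((hconnu y hy).mpr (pvConn_symm h2)).symm
      · -- y relabelled, x not
        rw [if_neg hx', if_pos hy']
        have hcy := (hconnuvx y hy).mp hy'
        constructor
        · intro h
          exact Or.inr (Or.inl ⟨(hconnu x hx).mp h, pvConn_symm hcy⟩)
        · rintro (h | ⟨h1, h2⟩ | ⟨h1, h2⟩)
          · exact absurd ((hconnuvx x hx).mpr (h.trans hcy)) hx'
          · exact (hconnu x hx).mpr h1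
          · exact absurd ((hconnuvx x hx).mpr h1) hx'
      · -- neither relabelled
        rw [if_neg hx', if_neg hy']
        constructor
        · intro h
          exact Or.inl ((hinv x hx y hy).mp h)
        · rintro (h | ⟨h1, h2⟩ | ⟨h1, h2⟩)
          · exact (hinv x hx y hy).mpr h
          · exact absurd ((hconnuvx y hy).mpr (pvConn_symm h2)) hy'
          · exact absurd ((hconnuvx x hx).mpr h1) hx'
    · rw [if_neg hne]
      have heq : lu = lv := not_not.mp (fun h => hne h)
      have hcuv : pvConn D u v := (hinv u heu v hev).mp (by rw [← hlu, ← hlv, heq])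
      apply ih (D ++ [e]) d hkeys (fun e' he' => hR e' (List.mem_cons_of_mem _ he'))
      intro x hx y hy
      rw [hinv x hx y hy]
      rw [show (D ++ [e]) = D ++ [(u, v)] by rw [hu, hv]]
      rw [pvConn_append_singleton]
      constructor
      · exact Or.inl
      · rintro (h | ⟨h1, h2⟩ | ⟨h1, h2⟩)
        · exact h
        · exact (h1.trans (hcuv.trans h2))
        · exact (h1.trans ((pvConn_symm hcuv).trans h2))

lemma setOfList_length (l : List Int) : ((PySem.Set.ofList l).length : Int) = (l.toFinset.card : Int) := by
  have hnd : (PySem.Set.ofList l).Nodup := PySem.Set.nodup_ofList l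
  rw [← List.toFinset_card_of_nodup hnd]
  congr 2
  ext x
  simp only [List.mem_toFinset, PySem.Set.mem_ofList]

-- ===== VERDICT (by name: the statements are the Claim_ definitions above) =====
theorem cycles_spec : Claim_equal_cycles := by
  intro p q hdom hpre
  unfold Spec_cycles
  set E := coloredEdges p ++ coloredEdges q with hE
  set M := (pvAbsBlocks p q).length with hM
  have hkeys_mem : ∀ x, x ∈ (alBuild E).keys ↔ 1 ≤ x ∧ x ≤ 2*(M:Int) := by
    intro x
    rw [mem_keys_alBuild_iff, hE, mem_pvEnds_iff_of_pre p q hpre, hM]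
  have hnd := nodup_keys_alBuild E
  have hfin : (alBuild E).keys.toFinset = Finset.Icc (1:Int) (2*(M:Int)) := by
    ext x
    rw [List.mem_toFinset, hkeys_mem, Finset.mem_Icc]
  have hlen : (alBuild E).keys.length = 2*M := by
    rw [← List.toFinset_card_of_nodup hnd, hfin, Int.card_Icc]
    omega
  have hsize : (alBuild E).size = 2*M := by rw [size_alBuild]; exact hlen
  have hNcast : (((alBuild E).size : Nat) : Int) = 2*(M:Int) := by rw [hsize]; push_cast; ring
  have hkeysN : ∀ x, x ∈ (alBuild E).keys ↔ 1 ≤ x ∧ x ≤ (((alBuild E).size : Nat) : Int) := by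
    intro x; rw [hkeys_mem, hNcast]
  obtain ⟨-, hcount⟩ := Aloop E (alBuild E).size hkeysN (alBuild E).size le_rfl
  have hA : cycles p q
      = (((Finset.Icc (1:Int) (((alBuild E).size : Nat) : Int)).image
          (pvCls E (Finset.Icc (1:Int) (((alBuild E).size : Nat) : Int)))).card : Int) :=
    hcount
  rw [hNcast] at hA
  -- ----- B -----
  have hinit := labInit_spec E PySem.Dict.empty (by simp [PySem.Dict.keys_empty])
    (by intro x hx; simp [PySem.Dict.keys_empty] at hx)
  obtain ⟨i1, i2, i3⟩ := hinit
  set K := PySem.Set.ofList (pvEnds E) with hK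
  have i1' : (E.foldl (fun d e => (d.setdefault e.1 e.1).setdefault e.2 e.2) PySem.Dict.empty).keys = K := by
    rw [i1, PySem.Dict.keys_empty, PySem.Set.update_nil_left]
  have hKnd : K.Nodup := PySem.Set.nodup_ofList _
  have hinv0 : ∀ x ∈ K, ∀ y ∈ K,
      ((E.foldl (fun d e => (d.setdefault e.1 e.1).setdefault e.2 e.2) PySem.Dict.empty).getD x 0
        = (E.foldl (fun d e => (d.setdefault e.1 e.1).setdefault e.2 e.2) PySem.Dict.empty).getD y 0
        ↔ pvConn [] x y) := by
    intro x hx y hy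
    rw [i3 x (by rw [i1']; exact hx), i3 y (by rw [i1']; exact hy)]
    rw [pvConn, Relation.reflTransGen_iff_eq (by intro b hb; simp [pvAdj] at hb)]
    exact ⟨fun h => h.symm, fun h => h.symm⟩
  have hRK : ∀ e ∈ E, e.1 ∈ K ∧ e.2 ∈ K := by
    intro e he
    rw [hK]
    constructor <;> rw [PySem.Set.mem_ofList] <;> unfold pvEnds <;>
      exact List.mem_flatMap.mpr ⟨e, he, by simp⟩
  obtain ⟨b1, b2⟩ := Bloop K hKnd E []
    (E.foldl (fun d e => (d.setdefault e.1 e.1).setdefault e.2 e.2) PySem.Dict.empty) i1' hRK hinv0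
  simp only [List.nil_append] at b2
  set label := E.foldl (fun d e =>
      let lu := d.getD e.1 0
      let lv := d.getD e.2 0
      if lu ≠ lv then
        d.keys.foldl (fun d' x => if d'.getD x 0 = lv then d'.insert x lu else d') d
      else d) (E.foldl (fun d e => (d.setdefault e.1 e.1).setdefault e.2 e.2) PySem.Dict.empty)
    with hlabel
  have hKlen : K.length = 2*M := by
    have := hlen
    rw [keys_alBuild] at this
    exact this
  have hKmem : ∀ x, x ∈ K ↔ 1 ≤ x ∧ x ≤ 2*(M:Int) := by
    intro x
    rw [hK, PySem.Set.mem_ofList, hE, mem_pvEnds_iff_of_pre p q hpre, hM]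
  have hlabsize : ((label.size : Nat) : Int) = 2*(M:Int) := by
    have hsz : label.size = label.keys.length := by simp [PySem.Dict.size, PySem.Dict.keys]
    rw [hsz, b1, hKlen]
    push_cast
    ring
  have hB : cycles_alt p q = ((PySem.Set.ofList ((PySem.List.pyRange 1 ((label.size : Int) + 1) 1).map
      (fun u => label.getD u 0))).length : Int) := rfl
  rw [hB, setOfList_length]
  have hrangefin : ((PySem.List.pyRange 1 ((label.size : Int) + 1) 1).map
      (fun u => label.getD u 0)).toFinset
      = (Finset.Icc (1:Int) (2*(M:Int))).image (fun u => label.getD u 0) := by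
    ext x
    simp only [List.mem_toFinset, List.mem_map, Finset.mem_image, Finset.mem_Icc]
    constructor
    · rintro ⟨u, hu, hux⟩
      rw [PySem.List.mem_pyRange_one, hlabsize] at hu
      exact ⟨u, ⟨hu.1, by omega⟩, hux⟩
    · rintro ⟨u, hu, hux⟩
      refine ⟨u, ?_, hux⟩
      rw [PySem.List.mem_pyRange_one, hlabsize]
      omega
  rw [hrangefin]
  have hcard : ((Finset.Icc (1:Int) (2*(M:Int))).image (fun u => label.getD u 0)).card
      = ((Finset.Icc (1:Int) (2*(M:Int))).image (pvCls E (Finset.Icc (1:Int) (2*(M:Int))))).card := by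
    apply card_image_eq_of_iff
    intro x hx y hy
    rw [Finset.mem_Icc] at hx hy
    rw [b2 x ((hKmem x).mpr hx) y ((hKmem y).mpr hy)]
    constructor
    · exact fun h => pvCls_eq_of_conn h
    · exact fun h => pvConn_of_cls_eq (Finset.mem_Icc.mpr hy) h
  rw [hA, hcard]
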